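-- pv_equiv track=rewrite | github.com/Todaime/KBP | src/benchmark/utils.py | get_matching_rels
-- ===== SOURCE A (Python) =====
-- import copy
--
-- def get_matching_rels(rels_a: list, rels_b: list):
--     """Check relations in common.
--
--     Args:
--         rels_a (list): relations from first entity
--         rels_b (list): relations from second entity
--
--     Returns:
--         relations in common, unmatched relations of a, unmatched relations of b
--     """
--     common_rels = []
--     unmatched_b = []
--     unmatched_a = copy.deepcopy(rels_a)
--     for rel_b in rels_b:
--         exists = False
--         rel_b_pred = rel_b[0]
--         rel_b_obj = rel_b[1]
--         rel_b_file = rel_b[2]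
--         for rel_a in unmatched_a:
--             if (
--                 rel_b_pred == rel_a[0]
--                 and rel_b_file == rel_a[2]
--                 and all(mention in rel_a[1] for mention in rel_b_obj)
--             ):
--                 exists = True
--                 unmatched_a.remove(rel_a)
--                 common_rels.append(rel_b)
--                 break
--         if not exists:
--             unmatched_b.append(rel_b)
--
--     return common_rels, list(unmatched_a), unmatched_b
-- ===== SOURCE B (Python) =====
-- import copy
--
-- def get_matching_rels(rels_a: list, rels_b: list):
--     """Check relations in common (index-based re-implementation)."""
--     snapshot = copy.deepcopy(rels_a)
--     index = {}
--     for pos, rel in enumerate(snapshot):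
--         index.setdefault((rel[0], rel[2]), []).append((pos, rel))
--     consumed = set()
--     common_rels = []
--     unmatched_b = []
--     for rel_b in rels_b:
--         hit = None
--         for pos, rel_a in index.get((rel_b[0], rel_b[2]), []):
--             if pos not in consumed and all(m in rel_a[1] for m in rel_b[1]):
--                 hit = pos
--                 break
--         if hit is None:
--             unmatched_b.append(rel_b)
--         else:
--             consumed.add(hit)
--             common_rels.append(rel_b)
--     unmatched_a = [rel for pos, rel in enumerate(snapshot) if pos not in consumed]
--     return common_rels, unmatched_a, unmatched_b
-- ===== Notes on version B (the rewrite author's own statement) =====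
-- stated objective: alternative
-- what changed: B replaces A's repeated linear rescans of the shrinking unmatched_a list (with list.remove) by a (pred, file)-keyed index of positions built once plus a consumed-position set, reconstructing unmatched_a from unconsumed positions at the end.
import Mathlib
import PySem

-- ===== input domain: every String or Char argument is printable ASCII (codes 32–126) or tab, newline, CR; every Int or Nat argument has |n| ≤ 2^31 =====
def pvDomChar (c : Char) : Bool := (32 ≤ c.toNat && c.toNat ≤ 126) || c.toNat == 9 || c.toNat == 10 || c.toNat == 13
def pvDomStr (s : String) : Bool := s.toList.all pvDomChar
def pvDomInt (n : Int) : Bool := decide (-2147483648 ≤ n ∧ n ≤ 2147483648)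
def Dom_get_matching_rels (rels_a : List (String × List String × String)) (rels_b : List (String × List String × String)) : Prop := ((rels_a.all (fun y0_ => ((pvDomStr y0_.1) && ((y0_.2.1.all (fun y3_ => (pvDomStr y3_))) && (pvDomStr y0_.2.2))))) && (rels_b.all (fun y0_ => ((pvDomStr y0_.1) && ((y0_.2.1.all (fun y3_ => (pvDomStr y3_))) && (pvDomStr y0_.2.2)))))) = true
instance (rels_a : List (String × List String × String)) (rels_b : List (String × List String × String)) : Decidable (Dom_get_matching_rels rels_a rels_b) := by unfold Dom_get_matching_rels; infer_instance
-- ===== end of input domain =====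

-- B replaces A's rescans of the shrinking unmatched_a list by a (pred, file)-keyed index of
-- positions built once, with a consumed-position set; return value is identical (A also only
-- mutates its private deepcopy, so side effects are identical too).

-- ===== PORT A =====
-- inner 'for rel_a in unmatched_a: if …: break' — returns the first matching rel_a
def pvFindA (rel_b : String × List String × String) :
    List (String × List String × String) → Option (String × List String × String)
  | [] => none
  | rel_a :: rest =>
    if rel_b.1 == rel_a.1 && rel_b.2.2 == rel_a.2.2
        && rel_b.2.1.all (fun mention => rel_a.2.1.contains mention) then
      some rel_a
    else pvFindA rel_b rest

def get_matching_rels (rels_a : List (String × List String × String)) (rels_b : List (String × List String × String)) : (List (String × List String × String)) × (List (String × List String × String)) × (List (String × List String × String)) :=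
  -- state: (common_rels, unmatched_a, unmatched_b); unmatched_a starts as the deepcopy of rels_a
  let st := rels_b.foldl
    (fun (st : (List (String × List String × String)) × (List (String × List String × String)) × (List (String × List String × String))) rel_b =>
      match pvFindA rel_b st.2.1 with
      | some rel_a =>
        -- exists = True: unmatched_a.remove(rel_a) (rel_a ∈ unmatched_a, so remove? is some), common_rels.append(rel_b)
        (st.1 ++ [rel_b], (PySem.List.remove? st.2.1 rel_a).getD st.2.1, st.2.2)
      | none => (st.1, st.2.1, st.2.2 ++ [rel_b]))
    ([], rels_a, [])
  (st.1, st.2.1, st.2.2)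

-- ===== PORT B =====
-- index.setdefault((rel[0], rel[2]), []).append((pos, rel)) over enumerate(snapshot)
def pvIndexB (snapshot : List (String × List String × String)) :
    PySem.Dict (String × String) (List (Int × (String × List String × String))) :=
  (PySem.List.enumerate snapshot).foldl
    (fun index pr =>
      index.insert (pr.2.1, pr.2.2.2) (index.getD (pr.2.1, pr.2.2.2) [] ++ [pr]))
    PySem.Dict.empty

-- inner 'for pos, rel_a in bucket: if …: hit = pos; break'
def pvBucketFind (rel_b : String × List String × String) (consumed : PySem.Set Int) :
    List (Int × (String × List String × String)) → Option Int
  | [] => none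
  | (pos, rel_a) :: rest =>
    if !(consumed.contains pos) && rel_b.2.1.all (fun m => rel_a.2.1.contains m) then some pos
    else pvBucketFind rel_b consumed rest

def get_matching_rels_alt (rels_a : List (String × List String × String)) (rels_b : List (String × List String × String)) : (List (String × List String × String)) × (List (String × List String × String)) × (List (String × List String × String)) :=
  let index := pvIndexB rels_a
  -- state: (consumed, common_rels, unmatched_b)
  let st := rels_b.foldl
    (fun (st : PySem.Set Int × (List (String × List String × String)) × (List (String × List String × String))) rel_b =>
      match pvBucketFind rel_b st.1 (index.getD (rel_b.1, rel_b.2.2) []) with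
      | some pos => (PySem.Set.add st.1 pos, st.2.1 ++ [rel_b], st.2.2)
      | none => (st.1, st.2.1, st.2.2 ++ [rel_b]))
    (PySem.Set.empty, [], [])
  (st.2.1,
   ((PySem.List.enumerate rels_a).filter (fun pr => !(st.1.contains pr.1))).map (·.2),
   st.2.2)

-- ===== PRECONDITION & SPEC =====
def Spec_get_matching_rels (rels_a : List (String × List String × String)) (rels_b : List (String × List String × String)) (out : (List (String × List String × String)) × (List (String × List String × String)) × (List (String × List String × String))) : Prop := out = get_matching_rels_alt rels_a rels_b
instance (rels_a : List (String × List String × String)) (rels_b : List (String × List String × String)) (out : (List (String × List String × String)) × (List (String × List String × String)) × (List (String × List String × String))) : Decidable (Spec_get_matching_rels rels_a rels_b out) := by unfold Spec_get_matching_rels; infer_instance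

-- ===== CLAIM (what is proved, stated in full; the proofs are below) =====
def Claim_equal_get_matching_rels : Prop := ∀ (rels_a : List (String × List String × String)) (rels_b : List (String × List String × String)), Dom_get_matching_rels rels_a rels_b → Spec_get_matching_rels rels_a rels_b (get_matching_rels rels_a rels_b)

-- ===== LEMMAS AND PROOFS =====
abbrev PvRel : Type := String × List String × String

-- the combined "A would take this entry" predicate over enumerated entries
def pvHitP (rel_b : PvRel) (c : PySem.Set Int) (pr : Int × PvRel) : Bool :=
  !(c.contains pr.1)
    && (rel_b.1 == pr.2.1 && rel_b.2.2 == pr.2.2.2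
        && rel_b.2.1.all (fun mention => pr.2.2.1.contains mention))

-- A's unmatched_a list, expressed through B's consumed set
def pvRest (rels_a : List PvRel) (c : PySem.Set Int) : List PvRel :=
  ((PySem.List.enumerate rels_a).filter (fun pr => !(c.contains pr.1))).map (·.2)

lemma pvIndexB_getD_aux (l : List (Int × PvRel))
    (d : PySem.Dict (String × String) (List (Int × PvRel))) (k : String × String) :
    (l.foldl (fun index pr =>
        index.insert (pr.2.1, pr.2.2.2) (index.getD (pr.2.1, pr.2.2.2) [] ++ [pr])) d).getD k []
      = d.getD k [] ++ l.filter (fun pr => (pr.2.1, pr.2.2.2) == k) := by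
  induction l generalizing d with
  | nil => simp
  | cons pr rest ih =>
    simp only [List.foldl_cons, List.filter_cons, ih]
    by_cases hk : (pr.2.1, pr.2.2.2) = k
    · rw [hk, PySem.Dict.getD_insert_self]
      simp
    · rw [PySem.Dict.getD_insert_of_ne _ _ _ (fun h => hk h.symm)]
      have hkb : ((pr.2.1, pr.2.2.2) == k) = false := beq_eq_false_iff_ne.mpr hk
      simp [hkb]

lemma pvIndexB_getD (rels_a : List PvRel) (k : String × String) :
    (pvIndexB rels_a).getD k []
      = (PySem.List.enumerate rels_a).filter (fun pr => (pr.2.1, pr.2.2.2) == k) := by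
  simpa using pvIndexB_getD_aux (PySem.List.enumerate rels_a) PySem.Dict.empty k

lemma pvFindA_eq (rel_b : PvRel) (c : PySem.Set Int) (l : List (Int × PvRel)) :
    pvFindA rel_b ((l.filter (fun pr => !(c.contains pr.1))).map (·.2))
      = (l.find? (pvHitP rel_b c)).map (·.2) := by
  induction l with
  | nil => simp [pvFindA]
  | cons pr rest ih =>
    rw [List.filter_cons]
    cases hc : c.contains pr.1 with
    | true =>
      have hp : pvHitP rel_b c pr = false := by rw [pvHitP, hc]; rfl
      rw [List.find?_cons_of_neg (by rw [hp]; exact Bool.false_ne_true)]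
      simp only [hc, Bool.not_true]
      rw [if_neg Bool.false_ne_true]
      exact ih
    | false =>
      simp only [hc, Bool.not_false]
      rw [if_pos trivial, List.map_cons]
      cases hcond : (rel_b.1 == pr.2.1 && rel_b.2.2 == pr.2.2.2
          && rel_b.2.1.all (fun mention => pr.2.2.1.contains mention)) with
      | true =>
        have hp : pvHitP rel_b c pr = true := by rw [pvHitP, hc, hcond]; rfl
        rw [List.find?_cons_of_pos hp, pvFindA, hcond]
        rfl
      | false =>
        have hp : pvHitP rel_b c pr = false := by rw [pvHitP, hc, hcond]; rfl
        rw [List.find?_cons_of_neg (by rw [hp]; exact Bool.false_ne_true), pvFindA, hcond]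
        simpa using ih

lemma pvBucketFind_eq (rel_b : PvRel) (c : PySem.Set Int) (l : List (Int × PvRel)) :
    pvBucketFind rel_b c (l.filter (fun pr => (pr.2.1, pr.2.2.2) == (rel_b.1, rel_b.2.2)))
      = (l.find? (pvHitP rel_b c)).map (·.1) := by
  induction l with
  | nil => simp [pvBucketFind]
  | cons pr rest ih =>
    obtain ⟨pos, ra⟩ := pr
    rw [List.filter_cons]
    by_cases hk : ((ra.1, ra.2.2) : String × String) = (rel_b.1, rel_b.2.2)
    · have h1 : ra.1 = rel_b.1 := (Prod.ext_iff.mp hk).1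
      have h2 : ra.2.2 = rel_b.2.2 := (Prod.ext_iff.mp hk).2
      have hp : pvHitP rel_b c (pos, ra)
          = (!(c.contains pos) && rel_b.2.1.all (fun m => ra.2.1.contains m)) := by
        simp [pvHitP, h1, h2]
      rw [if_pos (by exact beq_iff_eq.mpr hk)]
      cases hs : (!(c.contains pos) && rel_b.2.1.all (fun m => ra.2.1.contains m)) with
      | true =>
        rw [List.find?_cons_of_pos (by rw [hp, hs]), pvBucketFind, hs]
        rfl
      | false =>
        rw [List.find?_cons_of_neg (by rw [hp, hs]; exact Bool.false_ne_true),
          pvBucketFind, hs]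
        simpa using ih
    · have hp : pvHitP rel_b c (pos, ra) = false := by
        have hne : ¬(rel_b.1 = ra.1 ∧ rel_b.2.2 = ra.2.2) := by
          intro h
          exact hk (by rw [Prod.mk.injEq]; exact ⟨h.1.symm, h.2.symm⟩)
        rcases not_and_or.mp hne with h | h <;> simp [pvHitP, h]
      rw [if_neg (by rw [beq_eq_false_iff_ne.mpr hk]; exact Bool.false_ne_true),
        List.find?_cons_of_neg (by rw [hp]; exact Bool.false_ne_true)]
      exact ih

lemma pvRemove_eq (rel_b : PvRel) (c : PySem.Set Int) (l : List (Int × PvRel))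
    (pos : Int) (rel_a : PvRel)
    (hnd : l.Pairwise (fun p q => p.1 ≠ q.1))
    (hf : l.find? (pvHitP rel_b c) = some (pos, rel_a)) :
    PySem.List.remove? ((l.filter (fun pr => !(c.contains pr.1))).map (·.2)) rel_a
      = some ((l.filter (fun pr => !((PySem.Set.add c pos).contains pr.1))).map (·.2)) := by
  induction l with
  | nil => simp at hf
  | cons pr rest ih =>
    have hnd' := (List.pairwise_cons.mp hnd).2
    have hne := (List.pairwise_cons.mp hnd).1
    by_cases hp : pvHitP rel_b c pr = true
    · rw [List.find?_cons_of_pos hp] at hf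
      obtain rfl : pr = (pos, rel_a) := Option.some.inj hf
      simp only [pvHitP, Bool.and_eq_true, Bool.not_eq_true'] at hp
      obtain ⟨hc, _⟩ := hp
      have hcadd : (PySem.Set.add c pos).contains pos = true := by
        rw [PySem.Set.contains_eq_decide]
        simp [PySem.Set.mem_add]
      rw [List.filter_cons, List.filter_cons]
      simp only [hc, hcadd, Bool.not_false, Bool.not_true]
      rw [if_pos trivial, if_neg Bool.false_ne_true, List.map_cons, PySem.List.remove?_cons_self]
      congr 2
      apply List.filter_congr
      intro q hq
      have hqne : q.1 ≠ pos := Ne.symm (hne q hq)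
      rw [PySem.Set.contains_eq_decide, PySem.Set.contains_eq_decide]
      simp [PySem.Set.mem_add, hqne]
    · rw [List.find?_cons_of_neg hp] at hf
      have hmem : (pos, rel_a) ∈ rest := List.mem_of_find?_eq_some hf
      have hpos_ne : pr.1 ≠ pos := hne (pos, rel_a) hmem
      have hhit : pvHitP rel_b c (pos, rel_a) = true := List.find?_some hf
      rw [Bool.not_eq_true] at hp
      cases hc : c.contains pr.1 with
      | true =>
        have hcmem : pr.1 ∈ c := by
          rw [PySem.Set.contains_eq_decide] at hc
          simpa using hc
        have hcadd : (PySem.Set.add c pos).contains pr.1 = true := by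
          rw [PySem.Set.contains_eq_decide]
          simp [PySem.Set.mem_add, hcmem]
        rw [List.filter_cons, List.filter_cons]
        simp only [hc, hcadd, Bool.not_true]
        rw [if_neg Bool.false_ne_true, if_neg Bool.false_ne_true]
        exact ih hnd' hf
      | false =>
        have hcmem : pr.1 ∉ c := by
          rw [PySem.Set.contains_eq_decide] at hc
          simpa using hc
        have hcadd : (PySem.Set.add c pos).contains pr.1 = false := by
          rw [PySem.Set.contains_eq_decide]
          simp [PySem.Set.mem_add, hcmem, hpos_ne]
        have hcond : (rel_b.1 == pr.2.1 && rel_b.2.2 == pr.2.2.2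
            && rel_b.2.1.all (fun mention => pr.2.2.1.contains mention)) = false := by
          rw [pvHitP, hc] at hp
          simpa using hp
        have hra_ne : pr.2 ≠ rel_a := by
          intro h
          rw [pvHitP] at hhit
          simp only [← h] at hhit
          rw [hcond, Bool.and_false] at hhit
          exact Bool.false_ne_true hhit
        rw [List.filter_cons, List.filter_cons]
        simp only [hc, hcadd, Bool.not_false]
        rw [if_pos trivial, if_pos trivial, List.map_cons,
          PySem.List.remove?_cons_of_ne _ hra_ne, ih hnd' hf]
        rfl

lemma pvMain (rels_b rels_a : List PvRel) (c : PySem.Set Int) (common ub : List PvRel) :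
    (rels_b.foldl
      (fun (st : List PvRel × List PvRel × List PvRel) rel_b =>
        match pvFindA rel_b st.2.1 with
        | some rel_a => (st.1 ++ [rel_b], (PySem.List.remove? st.2.1 rel_a).getD st.2.1, st.2.2)
        | none => (st.1, st.2.1, st.2.2 ++ [rel_b]))
      (common, pvRest rels_a c, ub))
    = (let st := rels_b.foldl
        (fun (st : PySem.Set Int × List PvRel × List PvRel) rel_b =>
          match pvBucketFind rel_b st.1 ((pvIndexB rels_a).getD (rel_b.1, rel_b.2.2) []) with
          | some pos => (PySem.Set.add st.1 pos, st.2.1 ++ [rel_b], st.2.2)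
          | none => (st.1, st.2.1, st.2.2 ++ [rel_b]))
        (c, common, ub)
       (st.2.1, pvRest rels_a st.1, st.2.2)) := by
  induction rels_b generalizing c common ub with
  | nil => simp
  | cons rel_b rest ih =>
    have hnd : (PySem.List.enumerate rels_a).Pairwise (fun p q => p.1 ≠ q.1) :=
      (PySem.List.pairwise_lt_enumerate rels_a 0).imp (fun h => ne_of_lt h)
    have hbucket := pvIndexB_getD rels_a (rel_b.1, rel_b.2.2)
    have hfind := pvFindA_eq rel_b c (PySem.List.enumerate rels_a)
    have hbfind := pvBucketFind_eq rel_b c (PySem.List.enumerate rels_a)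
    simp only [List.foldl_cons]
    cases hf : (PySem.List.enumerate rels_a).find? (pvHitP rel_b c) with
    | none =>
      rw [hf] at hfind hbfind
      simp only [Option.map_none] at hfind hbfind
      rw [show pvFindA rel_b (pvRest rels_a c) = none from hfind,
        hbucket, hbfind]
      exact ih c common (ub ++ [rel_b])
    | some pr =>
      obtain ⟨pos, rel_a⟩ := pr
      rw [hf] at hfind hbfind
      simp only [Option.map_some] at hfind hbfind
      rw [show pvFindA rel_b (pvRest rels_a c) = some rel_a from hfind,
        hbucket, hbfind]
      have hrem : PySem.List.remove? (pvRest rels_a c) rel_a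
          = some (pvRest rels_a (PySem.Set.add c pos)) :=
        pvRemove_eq rel_b c (PySem.List.enumerate rels_a) pos rel_a hnd hf
      simp only [hrem, Option.getD_some]
      exact ih (PySem.Set.add c pos) (common ++ [rel_b]) ub

-- ===== VERDICT (by name: the statement is the Claim_ definition above) =====
theorem get_matching_rels_spec : Claim_equal_get_matching_rels := by
  intro rels_a rels_b _
  unfold Spec_get_matching_rels get_matching_rels get_matching_rels_alt
  have h0 : pvRest rels_a PySem.Set.empty = rels_a := by
    simp [pvRest, PySem.Set.empty, PySem.List.map_snd_enumerate]
  have h := pvMain rels_b rels_a PySem.Set.empty [] []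
  rw [h0] at h
  simp only [pvRest] at h
  simpa using h
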